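-- pv_equiv track=rewrite | github.com/Rookie20210913/Englishdir | say/say_pyaudio.py | process_english
-- ===== SOURCE A (Python) =====
-- def process_english(value:list)->list:
--     def output_english(values:list)->list:
--         value_split = []
--         new_list = []
--         times = 0
--         for i in value:
--             if times < 12:  # 修正这里，条件改为 < 12
--                 value_split.append(i)
--                 times += 1
--             if times == 12:  # 当到达12时，添加到new_list并重置
--                 new_list.append(value_split)
--                 value_split = []
--                 times = 0
--             # 如果最后还有剩余，追加到 new_list
--         if value_split:
--             new_list.append(value_split)
--         return new_list
--     len_value = len(value)
--     if len_value%12!=0: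
--         mod_value=12-len_value%12
--         for fill in range(mod_value):
--             value.append('')
--     final_list=output_english(value)
--     return final_list
-- ===== SOURCE B (Python) =====
-- def process_english(value: list) -> list:
--     # Pad in place to a multiple of 12 (same mutation A performs), then chunk by stride-indexed slicing.
--     value.extend([''] * ((12 - len(value) % 12) % 12))
--     out = []
--     i = 0
--     while i < len(value):
--         out.append(value[i:i + 12])
--         i += 12
--     return out
-- ===== Notes on version B (the rewrite author's own statement) =====
-- stated objective: simpler
-- what changed: Padding is computed in closed form ((12 - len % 12) % 12) and appended at once, and chunking is done by stride-indexed slicing value[i:i+12] instead of A's element-by-element counter/accumulator loop.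
import Mathlib
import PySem

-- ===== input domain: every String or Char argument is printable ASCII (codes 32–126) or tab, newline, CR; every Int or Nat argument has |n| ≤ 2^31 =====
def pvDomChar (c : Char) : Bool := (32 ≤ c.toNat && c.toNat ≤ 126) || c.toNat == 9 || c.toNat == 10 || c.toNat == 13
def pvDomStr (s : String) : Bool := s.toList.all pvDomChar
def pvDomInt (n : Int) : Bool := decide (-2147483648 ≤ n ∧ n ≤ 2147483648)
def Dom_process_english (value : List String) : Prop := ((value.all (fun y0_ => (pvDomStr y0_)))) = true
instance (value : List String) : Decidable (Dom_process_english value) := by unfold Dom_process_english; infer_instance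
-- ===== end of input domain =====

-- B pads with a closed-form count and chunks by repeated take-12/drop-12, replacing A's
-- counter/accumulator loop (simpler decomposition). Both A and B append the padding to the
-- argument list in place in Python; the equivalence proved here is about the return value.

-- ===== PORT A =====
-- one step of A's inner for-loop over the (padded) list; state = (value_split, new_list, times)
def pvStepA (s : List String × List (List String) × Nat) (i : String) :
    List String × List (List String) × Nat :=
  let (value_split, new_list, times) := s
  let (value_split, times) :=
    if times < 12 then (value_split ++ [i], times + 1) else (value_split, times)
  if times = 12 then ([], new_list ++ [value_split], 0) else (value_split, new_list, times)

def process_english (value : List String) : List (List String) :=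
  let len_value := value.length
  let value :=
    if len_value % 12 ≠ 0 then
      -- for fill in range(mod_value): value.append('')
      (PySem.List.pyRange 0 (12 - (len_value : Int) % 12) 1).foldl (fun v _ => v ++ [""]) value
    else value
  -- output_english(value)
  let r := value.foldl pvStepA ([], [], 0)
  if r.1 ≠ [] then r.2.1 ++ [r.1] else r.2.1

-- ===== PORT B =====
-- the while loop of Source B: 'while i < len(value): out.append(value[i:i+12]); i += 12'
def pvChunkFrom (value : List String) (i : Nat) : List (List String) :=
  if i < value.length then
    PySem.List.slice value (some (i : Int)) (some ((i : Int) + 12)) :: pvChunkFrom value (i + 12)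
  else []
termination_by value.length - i

def process_english_alt (value : List String) : List (List String) :=
  let value := value ++ List.replicate ((12 - value.length % 12) % 12) ""
  pvChunkFrom value 0

-- ===== PRECONDITION & SPEC =====
def Spec_process_english (value : List String) (out : List (List String)) : Prop := out = process_english_alt value
instance (value : List String) (out : List (List String)) : Decidable (Spec_process_english value out) := by unfold Spec_process_english; infer_instance

-- ===== CLAIM (what is proved, stated in full; the proofs are below) =====
def Claim_equal_process_english : Prop := ∀ (value : List String), Dom_process_english value → Spec_process_english value (process_english value)

-- ===== LEMMAS AND PROOFS =====

-- proof-only normal form of the chunking: groups of 12 with a (possibly short) leftover tail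
def pvChunk (rest : List String) : List (List String) :=
  if _h : rest = [] then [] else rest.take 12 :: pvChunk (rest.drop 12)
termination_by rest.length
decreasing_by
  cases rest with
  | nil => exact absurd rfl _h
  | cons x xs => simp


-- appending '' once per iteration of a list equals appending a replicate
theorem pv_foldl_append_replicate (l : List Int) (v : List String) :
    l.foldl (fun v _ => v ++ [""]) v = v ++ List.replicate l.length "" := by
  induction l generalizing v with
  | nil => simp
  | cons a t ih =>
    rw [List.foldl_cons, ih, List.append_assoc, List.singleton_append, ← List.replicate_succ]
    rfl

-- both pad to the same list
theorem pv_pad_eq (value : List String) :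
    (if value.length % 12 ≠ 0 then
      (PySem.List.pyRange 0 (12 - (value.length : Int) % 12) 1).foldl (fun v _ => v ++ [""]) value
    else value)
    = value ++ List.replicate ((12 - value.length % 12) % 12) "" := by
  by_cases h : value.length % 12 = 0
  · rw [if_neg (by simp [h])]
    simp [h]
  · rw [if_pos h, pv_foldl_append_replicate, PySem.List.length_pyRange_one]
    congr 2
    have h12 : value.length % 12 < 12 := Nat.mod_lt _ (by norm_num)
    have h0 : 0 < value.length % 12 := Nat.pos_of_ne_zero h
    have : ((value.length : Int) % 12) = ((value.length % 12 : Nat) : Int) := by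
      push_cast; rfl
    rw [this]
    omega

theorem pvChunk_nil : pvChunk [] = [] := by rw [pvChunk]; simp

theorem pvChunk_cons (x : String) (xs : List String) :
    pvChunk (x :: xs) = (x :: xs).take 12 :: pvChunk ((x :: xs).drop 12) := by
  rw [pvChunk]; simp

-- A's fold with a partial buffer buf (times = buf.length < 12) produces the chunks of buf ++ xs
theorem pv_fold_chunks (xs : List String) (buf : List String) (nl : List (List String))
    (hb : buf.length < 12) :
    (let r := xs.foldl pvStepA (buf, nl, buf.length)
     if r.1 ≠ [] then r.2.1 ++ [r.1] else r.2.1)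
    = nl ++ pvChunk (buf ++ xs) := by
  induction xs generalizing buf nl with
  | nil =>
    simp only [List.foldl_nil, List.append_nil]
    by_cases h : buf = []
    · simp [h, pvChunk_nil]
    · cases buf with
      | nil => exact absurd rfl h
      | cons b bs =>
        rw [pvChunk_cons]
        have ht : (b :: bs).take 12 = b :: bs := List.take_of_length_le (by omega)
        have hd : (b :: bs).drop 12 = [] := List.drop_of_length_le (by omega)
        simp [ht, hd, pvChunk_nil]
  | cons i xs ih =>
    simp only [List.foldl_cons]
    have hstep : pvStepA (buf, nl, buf.length) i =
        (if buf.length + 1 = 12 then (([] : List String), nl ++ [buf ++ [i]], 0)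
         else (buf ++ [i], nl, buf.length + 1)) := by
      simp [pvStepA, hb]
    rw [hstep]
    by_cases h12 : buf.length + 1 = 12
    · rw [if_pos h12]
      have := ih [] (nl ++ [buf ++ [i]]) (by norm_num)
      simp only [List.length_nil, List.nil_append] at this
      rw [this]
      have hne : buf ++ i :: xs ≠ [] := by simp
      have hcons : pvChunk (buf ++ i :: xs) = (buf ++ [i]) :: pvChunk xs := by
        cases hbx : buf ++ i :: xs with
        | nil => exact absurd hbx hne
        | cons y ys =>
          rw [pvChunk_cons, ← hbx]
          have hlen : (buf ++ [i]).length = 12 := by simp; omega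
          have h1 : buf ++ i :: xs = (buf ++ [i]) ++ xs := by simp
          rw [h1, List.take_append_of_le_length (by omega),
              List.drop_append_of_le_length (by omega)]
          have : List.take 12 (buf ++ [i]) = buf ++ [i] := List.take_of_length_le (by omega)
          have hd : List.drop 12 (buf ++ [i]) = [] := List.drop_of_length_le (by omega)
          rw [this, hd]; simp
      rw [hcons]; simp
    · rw [if_neg h12]
      have hlen : (buf ++ [i]).length = buf.length + 1 := by simp
      have := ih (buf ++ [i]) nl (by omega)
      rw [hlen] at this
      rw [this]
      congr 2
      simp

-- B's indexed while loop computes the same chunks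
theorem pv_chunkFrom_eq (value : List String) (i : Nat) :
    pvChunkFrom value i = pvChunk (value.drop i) := by
  by_cases h : i < value.length
  · rw [pvChunkFrom, if_pos h]
    have hs : PySem.List.slice value (some (i : Int)) (some ((i : Int) + 12))
        = (value.drop i).take 12 := by
      have := PySem.List.slice_natCast_add value i 12
      simpa using this
    have hne : value.drop i ≠ [] := by
      intro hd
      have := List.drop_eq_nil_iff.mp hd
      omega
    cases hdrop : value.drop i with
    | nil => exact absurd hdrop hne
    | cons y ys =>
      rw [pvChunk, dif_neg (by simp), ← hdrop]
      rw [hs, pv_chunkFrom_eq value (i + 12)]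
      congr 1
      rw [List.drop_drop]
  · rw [pvChunkFrom, if_neg h]
    have hd : value.drop i = [] := List.drop_eq_nil_iff.mpr (by omega)
    rw [hd, pvChunk]
    simp
termination_by value.length - i
decreasing_by omega

-- ===== VERDICT (by name: the statement is the Claim_ definition above) =====
theorem process_english_spec : Claim_equal_process_english := by
  intro value _
  unfold Spec_process_english process_english process_english_alt
  simp only []
  rw [pv_pad_eq, pv_chunkFrom_eq, List.drop_zero]
  have := pv_fold_chunks (value ++ List.replicate ((12 - value.length % 12) % 12) "") [] [] (by norm_num)
  simpa using this
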